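-- pv_equiv track=rewrite | github.com/TheGreatOleander/The_Great_Discovery | great_discovery/pressure_engine.py | _group_permutations
-- ===== SOURCE A (Python) =====
-- import itertools
--
-- def _group_permutations(wl_labels):
--     """
--     Yield all node orderings consistent with WL equivalence classes.
--
--     Nodes sharing a WL label are structurally equivalent — we permute
--     freely within their group. Across-group order is fixed by label rank.
--
--     This is the key efficiency gain: permutation space is O(Π gᵢ!)
--     instead of O(n!), where gᵢ is each group's size.
--     """
--     groups      = {}
--     for node, label in wl_labels.items():
--         groups.setdefault(label, []).append(node)
--     sorted_groups = [nodes for _, nodes in sorted(groups.items())]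
--     for combo in itertools.product(*[itertools.permutations(g) for g in sorted_groups]):
--         perm = []
--         for sub in combo:
--             perm.extend(sub)
--         yield perm
-- ===== SOURCE B (Python) =====
-- import itertools
--
-- def _group_permutations(wl_labels):
--     items = list(wl_labels.items())
--     labels = sorted({label for _, label in items})
--     groups = [[node for node, label in items if label == lab] for lab in labels]
--
--     def emit(i, prefix):
--         if i == len(groups):
--             yield list(prefix)
--         else:
--             for p in itertools.permutations(groups[i]):
--                 yield from emit(i + 1, prefix + list(p))
--
--     yield from emit(0, [])
-- ===== Notes on version B (the rewrite author's own statement) =====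
-- stated objective: alternative
-- what changed: Replaces the dict.setdefault grouping + itertools.product over permutation lists + flattening loop by filter-per-sorted-distinct-label grouping and a recursive prefix-building generator that yields each ordering directly, one group per recursion level.
import Mathlib
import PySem

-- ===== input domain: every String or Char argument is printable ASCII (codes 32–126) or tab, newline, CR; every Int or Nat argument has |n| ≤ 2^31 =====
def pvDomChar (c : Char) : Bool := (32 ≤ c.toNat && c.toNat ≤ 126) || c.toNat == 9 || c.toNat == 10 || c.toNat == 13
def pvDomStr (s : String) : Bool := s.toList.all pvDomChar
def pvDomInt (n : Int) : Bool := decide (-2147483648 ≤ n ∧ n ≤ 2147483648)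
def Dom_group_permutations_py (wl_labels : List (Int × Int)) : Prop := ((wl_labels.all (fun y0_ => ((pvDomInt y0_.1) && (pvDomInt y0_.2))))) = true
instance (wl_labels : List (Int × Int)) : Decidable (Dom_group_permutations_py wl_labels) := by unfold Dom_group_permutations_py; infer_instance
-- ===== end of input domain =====

-- B replaces itertools.product over permutation lists by a recursive prefix-building
-- enumerator over groups formed by filtering per sorted distinct label (alternative
-- decomposition, same output and order).


-- ===== PORT A =====
-- itertools.permutations(g) (full length, itertools order)
def pvPerms (g : List Int) : List (List Int) := PySem.List.permutations g g.length

-- itertools.product(*lists): first factor slowest, last fastest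
def pvProd : List (List (List Int)) → List (List (List Int))
  | [] => [[]]
  | g :: gs => g.flatMap (fun x => (pvProd gs).map (x :: ·))

def group_permutations_py (wl_labels : List (Int × Int)) : List (List Int) :=
  -- groups.setdefault(label, []).append(node)  ==  groups[label] = groups.get(label, []) + [node]
  let groups := wl_labels.foldl (fun d p => d.modify p.2 [] (fun cur => cur ++ [p.1])) PySem.Dict.empty
  -- sorted(groups.items()): dict keys are unique, so Python's tuple comparison = comparison by key (exact)
  let sorted_groups := (PySem.List.sorted groups.items (fun p => p.1)).map (fun p => p.2)
  (pvProd (sorted_groups.map pvPerms)).map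
    (fun combo => combo.foldl (fun acc sub => acc ++ sub) [])

-- ===== PORT B =====
-- groups = [[node for node, label in items if label == lab] for lab in sorted(set(labels))]
def pvGroupsOf (items : List (Int × Int)) : List (List Int) :=
  (PySem.List.sorted (PySem.Set.ofList (items.map (fun p => p.2))) (fun x => x)).map
    (fun lab => (items.filter (fun p => p.2 == lab)).map (fun p => p.1))

-- emit(i, prefix): recursive generator, one group per level
def pvEmit : List (List Int) → List Int → List (List Int)
  | [], pre => [pre]
  | g :: gs, pre => (pvPerms g).flatMap (fun p => pvEmit gs (pre ++ p))

def group_permutations_py_alt (wl_labels : List (Int × Int)) : List (List Int) :=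
  pvEmit (pvGroupsOf wl_labels) []

-- ===== PRECONDITION & SPEC =====
def Spec_group_permutations_py (wl_labels : List (Int × Int)) (out : List (List Int)) : Prop := out = group_permutations_py_alt wl_labels
instance (wl_labels : List (Int × Int)) (out : List (List Int)) : Decidable (Spec_group_permutations_py wl_labels out) := by unfold Spec_group_permutations_py; infer_instance

-- ===== CLAIM (what is proved, stated in full; the proofs are below) =====
def Claim_equal_group_permutations_py : Prop := ∀ (wl_labels : List (Int × Int)), Dom_group_permutations_py wl_labels → Spec_group_permutations_py wl_labels (group_permutations_py wl_labels)

-- ===== LEMMAS AND PROOFS =====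

-- A's grouping dict, named for the proofs
def pvDictOf (l : List (Int × Int)) : PySem.Dict Int (List Int) :=
  l.foldl (fun d p => d.modify p.2 [] (fun cur => cur ++ [p.1])) PySem.Dict.empty

theorem pvDictOf_getD (l : List (Int × Int)) (c : Int) :
    (pvDictOf l).getD c [] = (l.filter (fun p => p.2 == c)).map (fun p => p.1) := by
  have h : pvDictOf l =
      (l.map Prod.swap).foldl (fun d p => d.modify p.1 [] (fun cur => cur ++ [p.2])) PySem.Dict.empty := by
    rw [pvDictOf, List.foldl_map]
    simp
  rw [h, PySem.Dict.getD_foldl_modify_append]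
  simp [List.filter_map, List.map_map, Function.comp_def, Prod.swap]

theorem pvDictOf_keys (l : List (Int × Int)) :
    (pvDictOf l).keys = PySem.Set.ofList (l.map (fun p => p.2)) := by
  have := PySem.Dict.keys_foldl_modify_key l (fun p => p.2) ([] : List Int)
      (fun _ p => (fun cur => cur ++ [p.1])) PySem.Dict.empty
  rw [pvDictOf] at *
  rw [this, PySem.Set.ofList_eq_foldl]
  rfl

theorem pvDictOf_keys_nodup (l : List (Int × Int)) : (pvDictOf l).keys.Nodup := by
  exact PySem.Dict.nodup_keys_foldl_modify_key l (fun p => p.2) ([] : List Int)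
      (fun _ p => (fun cur => cur ++ [p.1])) PySem.Dict.empty List.nodup_nil

-- A's sorted group list coincides with B's filter-per-sorted-label group list
theorem sorted_groups_eq (l : List (Int × Int)) :
    (PySem.List.sorted (pvDictOf l).items (fun p => p.1)).map (fun p => p.2) = pvGroupsOf l := by
  have hnd := pvDictOf_keys_nodup l
  have hitems := PySem.Dict.items_eq_map_keys (pvDictOf l) hnd ([] : List Int)
  have hsorted : PySem.List.sorted (pvDictOf l).items (fun p => p.1) =
      (PySem.List.sorted (pvDictOf l).keys (fun x => x)).map
        (fun k => (k, (pvDictOf l).getD k [])) := by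
    apply PySem.List.sorted_eq_of_perm_of_pairwise_lt
    · rw [hitems]
      exact (PySem.List.sorted_perm (pvDictOf l).keys (fun x => x) false).map _
    · rw [List.pairwise_map]
      have := PySem.List.sorted_ofList_pairwise_lt (l.map (fun p => p.2))
      rw [← pvDictOf_keys] at this
      exact this
  rw [hsorted, pvGroupsOf, pvDictOf_keys, List.map_map]
  apply List.map_congr_left
  intro k _
  simp [pvDictOf_getD]

-- the recursive enumerator equals product-then-concatenate with a prefix accumulator
theorem pvEmit_eq (gs : List (List Int)) (pre : List Int) :
    pvEmit gs pre = (pvProd (gs.map pvPerms)).map (fun c => pre ++ c.flatten) := by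
  induction gs generalizing pre with
  | nil => simp [pvEmit, pvProd]
  | cons g gs ih =>
    simp only [pvEmit, pvProd, List.map_cons, List.map_flatMap]
    apply List.flatMap_congr ?_
    intro p _
    rw [ih]
    simp [List.map_map, Function.comp_def, List.append_assoc]

-- ===== VERDICT (by name: the statement is the Claim_ definition above) =====
theorem group_permutations_py_spec : Claim_equal_group_permutations_py := by
  intro l _
  show group_permutations_py l = group_permutations_py_alt l
  rw [group_permutations_py, group_permutations_py_alt]
  have h1 : (PySem.List.sorted (pvDictOf l).items (fun p => p.1)).map (fun p => p.2) =
      pvGroupsOf l := sorted_groups_eq l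
  rw [show (l.foldl (fun d p => d.modify p.2 [] (fun cur => cur ++ [p.1])) PySem.Dict.empty) =
      pvDictOf l from rfl, h1, pvEmit_eq]
  apply List.map_congr_left
  intro c _
  rw [PySem.List.foldl_append_eq_flatten]
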